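-- pv_equiv track=rewrite | github.com/DarkShadow4/Python | Python 3/Olimpiada_2020/Preparacion/recuento_votos.py | get_the_chosen_ones
-- ===== SOURCE A (Python) =====
-- def get_the_chosen_ones(candidates, p): # de momento no lo hace en orden alfabético si hay empate
--     the_chosen_ones = []
--     for chosen_number in range(p):
--         found = False
--         for key, value in sorted(candidates.items(), key=lambda x:x[0]): # as I sort the tuple alphabetically, i do not need to worry about sorting
--                                                                          # a stalemate case
--             if value == max(candidates.values()) and not found:
--                 the_chosen_ones.append(key)
--                 found = True
--                 del candidates[key]
--     return(the_chosen_ones)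
-- ===== SOURCE B (Python) =====
-- def get_the_chosen_ones(candidates, p):
--     # One sort by (-votes, name) replaces A's p rounds of sort + repeated max scans.
--     order = sorted(candidates, key=lambda k: (-candidates[k], k))
--     chosen = order[:p] if p > 0 else []
--     for k in chosen:  # reproduce A's mutation of the argument
--         del candidates[k]
--     return chosen
-- ===== Notes on version B (the rewrite author's own statement) =====
-- stated objective: faster
-- what changed: A runs p rounds, each re-sorting the dict alphabetically and recomputing max(values) for every item; B sorts the keys once by (-votes, name) and returns the first p of them (deleting them from the dict like A does).
import Mathlib
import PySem

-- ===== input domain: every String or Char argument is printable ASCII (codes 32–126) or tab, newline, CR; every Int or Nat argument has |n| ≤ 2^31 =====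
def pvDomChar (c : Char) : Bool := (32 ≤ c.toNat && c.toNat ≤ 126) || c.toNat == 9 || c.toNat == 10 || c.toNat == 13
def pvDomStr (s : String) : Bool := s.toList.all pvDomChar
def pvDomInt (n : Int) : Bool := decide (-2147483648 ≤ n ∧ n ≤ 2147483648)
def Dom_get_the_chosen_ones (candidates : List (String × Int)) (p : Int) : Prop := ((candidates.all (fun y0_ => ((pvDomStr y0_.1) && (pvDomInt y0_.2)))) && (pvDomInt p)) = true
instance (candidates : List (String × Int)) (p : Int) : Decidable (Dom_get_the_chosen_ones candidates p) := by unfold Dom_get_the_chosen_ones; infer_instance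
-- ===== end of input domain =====

-- B replaces A's p rounds of (sort + a max-scan per item) by ONE sort by (-votes, name) and a
-- prefix take; both Pythons delete the chosen keys from `candidates` (same observable mutation),
-- the equivalence proved here is about the RETURN value.

-- ===== PORT A =====
-- inner loop body: 'if value == max(candidates.values()) and not found: append; found = True; del candidates[key]'
-- (the 'none' branch of the match is Python's ValueError on max of an empty dict — unreachable, because the
--  dict can only become empty after its last snapshot item was consumed)
def pvInnerStep (st2 : Bool × PySem.Dict String Int × List String) (kv : String × Int) :
    Bool × PySem.Dict String Int × List String :=
  if ((match PySem.List.max? st2.2.1.values (fun v => v) with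
       | some m => kv.2 == m
       | none => false) && !st2.1)
  then (true, st2.2.1.erase kv.1, st2.2.2 ++ [kv.1])
  else st2

-- one pass of 'for chosen_number in range(p)': sort the items alphabetically, scan them with the found flag
def pvRound (st : PySem.Dict String Int × List String) : PySem.Dict String Int × List String :=
  ((PySem.List.sorted st.1.items (fun kv => kv.1)).foldl pvInnerStep (false, st.1, st.2)).2

def get_the_chosen_ones (candidates : List (String × Int)) (p : Int) : List String :=
  ((PySem.List.pyRange 0 p 1).foldl (fun st _ => pvRound st) (PySem.Dict.mk candidates, [])).2

-- ===== PORT B =====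
-- Source B: order = sorted(candidates, key=lambda k: (-candidates[k], k)); chosen = order[:p] if p > 0 else []
-- (candidates[k] is ported as getD … 0: the lookup of a key of the dict never misses)
def get_the_chosen_ones_alt (candidates : List (String × Int)) (p : Int) : List String :=
  let d : PySem.Dict String Int := PySem.Dict.mk candidates
  let order := PySem.List.sorted2 d.keys (fun k => -(d.getD k 0)) (fun k => k)
  if 0 < p then PySem.List.slice order none (some p) else []

-- ===== PRECONDITION & SPEC =====
-- Pre_ only demands that the association list is a well-formed Python dict (no duplicate keys):
-- the Python argument is a dict, which cannot carry duplicate keys at all.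
def Pre_get_the_chosen_ones (candidates : List (String × Int)) (p : Int) : Prop :=
  (candidates.map Prod.fst).Nodup
instance (candidates : List (String × Int)) (p : Int) : Decidable (Pre_get_the_chosen_ones candidates p) := by unfold Pre_get_the_chosen_ones; infer_instance

def pvWitness_get_the_chosen_ones : (List (String × Int)) × Int := ([("ana", 3), ("bob", 3), ("cy", 7)], 2)

def Spec_get_the_chosen_ones (candidates : List (String × Int)) (p : Int) (out : List String) : Prop := out = get_the_chosen_ones_alt candidates p
instance (candidates : List (String × Int)) (p : Int) (out : List String) : Decidable (Spec_get_the_chosen_ones candidates p out) := by unfold Spec_get_the_chosen_ones; infer_instance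

-- ===== CLAIM (what is proved, stated in full; the proofs are below) =====
def Claim_equal_get_the_chosen_ones : Prop := ∀ (candidates : List (String × Int)) (p : Int), Dom_get_the_chosen_ones candidates p → Pre_get_the_chosen_ones candidates p → Spec_get_the_chosen_ones candidates p (get_the_chosen_ones candidates p)

-- ===== LEMMAS AND PROOFS =====

-- the comparison key both programs implicitly select by: (-votes, name), lexicographic
def pvKey (kv : String × Int) : Int ×ₗ String := toLex (-kv.2, kv.1)

-- the selection order: items sorted by (-votes, name)
def pvSel (l : List (String × Int)) : List (String × Int) := PySem.List.sorted l pvKey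

lemma pvKey_injective : Function.Injective pvKey := by
  intro a b h
  simp only [pvKey] at h
  have := toLex.injective h
  obtain ⟨h1, h2⟩ := Prod.mk.injEq .. ▸ this
  · exact Prod.ext (by simpa using h2) (by omega)

-- Python's tuple key (k1 x, k2 x) is the lexicographic product key
lemma sorted2_eq_sorted_toLex {α : Type} {κ₁ κ₂ : Type} [LinearOrder κ₁] [LinearOrder κ₂]
    (xs : List α) (k1 : α → κ₁) (k2 : α → κ₂) :
    PySem.List.sorted2 xs k1 k2 = PySem.List.sorted xs (fun x => toLex (k1 x, k2 x)) := by
  rw [PySem.List.sorted_eq_foldl_insertBy]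
  simp only [PySem.List.sorted2]
  have hb : (fun a b => decide (k1 a < k1 b) || (!decide (k1 b < k1 a) && decide (k2 a < k2 b)))
      = (fun a b => decide ((fun x => toLex (k1 x, k2 x)) a < (fun x => toLex (k1 x, k2 x)) b)) := by
    funext a b
    simp only [Prod.Lex.lt_iff, ofLex_toLex]
    rcases lt_trichotomy (k1 a) (k1 b) with h | h | h
    · simp [h]
    · simp [h]
    · simp [h, h.asymm, h.ne']
  rw [hb]
  rfl

lemma mem_pvSel {l : List (String × Int)} {x : String × Int} (hx : x ∈ pvSel l) : x ∈ l :=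
  (PySem.List.mem_sorted l pvKey false x).mp hx

lemma pvSel_nodup {l : List (String × Int)} (h : (l.map Prod.fst).Nodup) : (pvSel l).Nodup :=
  ((PySem.List.sorted_perm l pvKey false).nodup_iff).mpr h.of_map

lemma pvSel_pairwise_lt {l : List (String × Int)} (h : (l.map Prod.fst).Nodup) :
    (pvSel l).Pairwise (fun a b => pvKey a < pvKey b) := by
  have hle : (pvSel l).Pairwise (fun a b => pvKey a ≤ pvKey b) := PySem.List.sorted_pairwise l pvKey
  have hne : (pvSel l).Pairwise (fun a b => a ≠ b) := pvSel_nodup h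
  exact (hle.and hne).imp (fun {a b} hab => lt_of_le_of_ne hab.1 (fun hk => hab.2 (pvKey_injective hk)))

lemma pvSel_ne_nil {l : List (String × Int)} {e : String × Int} {t : List (String × Int)}
    (hsel : pvSel l = e :: t) : l ≠ [] := by
  intro hnil
  have h0 : pvSel l = [] := (PySem.List.sorted_eq_nil_iff l pvKey false).mpr hnil
  rw [hsel] at h0
  cases h0

-- B's sorted key list is the first components of the selection order
lemma alt_order_eq {l : List (String × Int)} (h : (l.map Prod.fst).Nodup) :
    PySem.List.sorted (l.map Prod.fst)
      (fun k => toLex (-(PySem.Dict.getD (PySem.Dict.mk l) k 0), k)) = (pvSel l).map Prod.fst := by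
  apply PySem.List.sorted_eq_of_perm_of_pairwise_lt
  · exact (PySem.List.sorted_perm l pvKey false).map Prod.fst
  · rw [List.pairwise_map]
    refine List.Pairwise.imp_of_mem ?_ (pvSel_pairwise_lt h)
    intro a b ha hb hab
    have hga : PySem.Dict.getD (PySem.Dict.mk l) a.1 0 = a.2 :=
      PySem.Dict.getD_of_mem_items (d := PySem.Dict.mk l) (mem_pvSel ha) h 0
    have hgb : PySem.Dict.getD (PySem.Dict.mk l) b.1 0 = b.2 :=
      PySem.Dict.getD_of_mem_items (d := PySem.Dict.mk l) (mem_pvSel hb) h 0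
    simpa [hga, hgb, pvKey] using hab

-- head of the selection order: its value is the maximum of the values
lemma head_sel_value_max {l : List (String × Int)} {e : String × Int} {t : List (String × Int)}
    (hsel : pvSel l = e :: t) :
    PySem.List.max? ((PySem.Dict.mk l).values) (fun v => v) = some e.2 := by
  have hl : l ≠ [] := pvSel_ne_nil hsel
  have hkmin : ∀ y ∈ l, pvKey e ≤ pvKey y := PySem.List.key_head_sorted_le l pvKey hsel
  have hel : e ∈ l := mem_pvSel (hsel ▸ List.mem_cons_self)
  have hvne : (PySem.Dict.mk l).values ≠ [] := by
    cases l with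
    | nil => exact absurd rfl hl
    | cons x xs => simp [PySem.Dict.values]
  cases hm : PySem.List.max? ((PySem.Dict.mk l).values) (fun v => v) with
  | none => exact absurd ((PySem.List.max?_eq_none_iff _ _).mp hm) hvne
  | some m =>
    have hmmem : m ∈ (PySem.Dict.mk l).values := PySem.List.max?_mem hm
    have h1 : e.2 ≤ m := PySem.List.max?_isMax hm e.2 (List.mem_map.mpr ⟨e, hel, rfl⟩)
    have h2 : m ≤ e.2 := by
      obtain ⟨y, hyl, hym⟩ := List.mem_map.mp hmmem
      have hk := hkmin y hyl
      rw [pvKey, pvKey, Prod.Lex.le_iff] at hk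
      simp only [ofLex_toLex] at hk
      subst hym
      rcases hk with hlt | ⟨heq, _⟩ <;> omega
    rw [le_antisymm h2 h1]

-- the inner scan skips everything once found
lemma foldl_innerStep_found (w : List (String × Int)) (d : PySem.Dict String Int) (acc : List String) :
    w.foldl pvInnerStep (true, d, acc) = (true, d, acc) := by
  induction w with
  | nil => rfl
  | cons x xs ih => simpa [pvInnerStep] using ih

-- the inner scan skips every item whose value is not the maximum
lemma foldl_innerStep_miss (d : PySem.Dict String Int) (m : Int)
    (hm : PySem.List.max? d.values (fun v => v) = some m) :
    ∀ (u : List (String × Int)) (acc : List String), (∀ x ∈ u, (x.2 == m) = false) →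
    u.foldl pvInnerStep (false, d, acc) = (false, d, acc) := by
  intro u
  induction u with
  | nil => intro acc _; rfl
  | cons x xs ih =>
    intro acc hu
    have hstep : pvInnerStep (false, d, acc) x = (false, d, acc) := by
      simp [pvInnerStep, hm, hu x List.mem_cons_self]
    rw [List.foldl_cons, hstep]
    exact ih acc (fun y hy => hu y (List.mem_cons_of_mem _ hy))

-- one round of A extracts the head of the selection order
lemma pvRound_eq {l : List (String × Int)} (h : (l.map Prod.fst).Nodup)
    {e : String × Int} {t : List (String × Int)} (hsel : pvSel l = e :: t) (acc : List String) :
    pvRound (PySem.Dict.mk l, acc)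
      = (PySem.Dict.mk (l.filter (fun kv => !(kv.1 == e.1))), acc ++ [e.1]) := by
  have hmax : PySem.List.max? ((PySem.Dict.mk l).values) (fun v => v) = some e.2 :=
    head_sel_value_max hsel
  have hkmin : ∀ y ∈ l, pvKey e ≤ pvKey y := PySem.List.key_head_sorted_le l pvKey hsel
  have hel : e ∈ l := mem_pvSel (hsel ▸ List.mem_cons_self)
  have hsperm : (PySem.List.sorted ((PySem.Dict.mk l).items) (fun kv => kv.1)).Perm l :=
    PySem.List.sorted_perm _ _ _
  have he_snap : e ∈ PySem.List.sorted ((PySem.Dict.mk l).items) (fun kv => kv.1) :=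
    hsperm.mem_iff.mpr hel
  obtain ⟨u, w, huw⟩ := List.append_of_mem he_snap
  have hsnodup : (PySem.List.sorted ((PySem.Dict.mk l).items) (fun kv => kv.1)).Nodup :=
    hsperm.nodup_iff.mpr h.of_map
  have hfst_nodup : ((PySem.List.sorted ((PySem.Dict.mk l).items) (fun kv => kv.1)).map Prod.fst).Nodup :=
    ((hsperm.map Prod.fst).nodup_iff).mpr h
  have hpair : (PySem.List.sorted ((PySem.Dict.mk l).items) (fun kv => kv.1)).Pairwise
      (fun a b => a.1 ≤ b.1) := PySem.List.sorted_pairwise _ _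
  have henotu : e ∉ u := by
    have hmid := List.nodup_middle.mp (huw ▸ hsnodup)
    exact fun hmem => (List.nodup_cons.mp hmid).1 (List.mem_append.mpr (Or.inl hmem))
  have hu : ∀ x ∈ u, (x.2 == e.2) = false := by
    intro x hx
    have hxsnap : x ∈ PySem.List.sorted ((PySem.Dict.mk l).items) (fun kv => kv.1) :=
      huw ▸ List.mem_append.mpr (Or.inl hx)
    have hxl : x ∈ l := hsperm.mem_iff.mp hxsnap
    have hxle : x.1 ≤ e.1 :=
      (List.pairwise_append.mp (huw ▸ hpair)).2.2 x hx e List.mem_cons_self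
    simp only [beq_eq_false_iff_ne, ne_eq]
    intro hveq
    have hke := hkmin x hxl
    rw [pvKey, pvKey, Prod.Lex.le_iff] at hke
    simp only [ofLex_toLex] at hke
    have hfe : x.1 = e.1 := by
      rcases hke with hlt | ⟨_, hle'⟩
      · omega
      · exact le_antisymm hxle hle'
    have hxe : x = e := List.inj_on_of_nodup_map hfst_nodup hxsnap he_snap hfe
    exact henotu (hxe ▸ hx)
  have hmax' : PySem.List.max? (List.map (fun x => x.2) l) (fun v => v) = some e.2 := hmax
  have hstep : pvInnerStep (false, PySem.Dict.mk l, acc) e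
      = (true, (PySem.Dict.mk l).erase e.1, acc ++ [e.1]) := by
    simp [pvInnerStep, hmax']
  simp only [pvRound]
  rw [huw, List.foldl_append, foldl_innerStep_miss _ _ hmax u acc hu, List.foldl_cons, hstep,
    foldl_innerStep_found]
  rfl

-- after removing the chosen key, the selection order is the tail
lemma pvSel_erase {l : List (String × Int)} (h : (l.map Prod.fst).Nodup)
    {e : String × Int} {t : List (String × Int)} (hsel : pvSel l = e :: t) :
    pvSel (l.filter (fun kv => !(kv.1 == e.1))) = t := by
  have hperm : l.Perm (e :: t) := by
    have hp : (pvSel l).Perm l := PySem.List.sorted_perm l pvKey false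
    rw [hsel] at hp
    exact hp.symm
  have hsel_fst : ((e :: t).map Prod.fst).Nodup := by
    have : ((pvSel l).map Prod.fst).Nodup :=
      (((PySem.List.sorted_perm l pvKey false).map Prod.fst).nodup_iff).mpr h
    rwa [hsel] at this
  have ht_keys : e.1 ∉ t.map Prod.fst := by
    have h0 : (e.1 :: t.map Prod.fst).Nodup := by simpa using hsel_fst
    exact (List.nodup_cons.mp h0).1
  have hfe : (e :: t).filter (fun kv => !(kv.1 == e.1)) = t := by
    have ht : t.filter (fun kv => !(kv.1 == e.1)) = t :=
      List.filter_eq_self.mpr (fun (kv : String × Int) hkv => by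
        have hne : kv.1 ≠ e.1 := fun hk => ht_keys (List.mem_map.mpr ⟨kv, hkv, hk⟩)
        simp [hne])
    simp [ht]
  apply PySem.List.sorted_eq_of_perm_of_pairwise_lt
  · exact (hfe ▸ (hperm.filter (fun kv : String × Int => !(kv.1 == e.1)))).symm
  · exact (List.pairwise_cons.mp (hsel ▸ pvSel_pairwise_lt h)).2

lemma foldl_ignore_eq_iterate {α β : Type} (f : α → α) (l : List β) (x : α) :
    l.foldl (fun s _ => f s) x = f^[l.length] x := by
  induction l generalizing x with
  | nil => rfl
  | cons y ys ih => simpa [Function.iterate_succ_apply] using ih (f x)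

lemma length_pyRange_zero (p : Int) : (PySem.List.pyRange 0 p 1).length = p.toNat := by
  simp only [PySem.List.pyRange]
  split_ifs with h0 h1 h2 <;> simp_all
  omega

-- the main loop invariant: n rounds of A produce the first n names of the selection order
lemma iterate_pvRound (n : Nat) : ∀ (l : List (String × Int)) (acc : List String),
    (l.map Prod.fst).Nodup →
    (pvRound^[n] (PySem.Dict.mk l, acc)).2 = acc ++ ((pvSel l).map Prod.fst).take n := by
  induction n with
  | zero => intro l acc _; simp
  | succ n ih =>
    intro l acc h
    rw [Function.iterate_succ_apply]
    cases hsel : pvSel l with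
    | nil =>
      have hl : l = [] := by
        by_contra hne
        cases hcs : pvSel l with
        | nil =>
          exact hne ((PySem.List.sorted_eq_nil_iff l pvKey false).mp hcs)
        | cons a b => rw [hcs] at hsel; cases hsel
      subst hl
      have hround : pvRound (PySem.Dict.mk [], acc) = (PySem.Dict.mk [], acc) := rfl
      rw [hround, ih [] acc (by simp)]
      simp [hsel]
    | cons e t =>
      rw [pvRound_eq h hsel acc]
      have h' : ((l.filter (fun kv => !(kv.1 == e.1))).map Prod.fst).Nodup :=
        (((List.filter_sublist).map Prod.fst).nodup) h
      rw [ih _ _ h', pvSel_erase h hsel]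
      simp

-- ===== VERDICT (by name: the statement is the Claim_ definition above) =====
theorem get_the_chosen_ones_spec : Claim_equal_get_the_chosen_ones := by
  intro candidates p _ hpre
  unfold Spec_get_the_chosen_ones get_the_chosen_ones get_the_chosen_ones_alt
  rw [foldl_ignore_eq_iterate, length_pyRange_zero, iterate_pvRound p.toNat candidates [] hpre]
  have horder : PySem.List.sorted2 ((PySem.Dict.mk candidates).keys)
      (fun k => -(PySem.Dict.getD (PySem.Dict.mk candidates) k 0)) (fun k => k)
      = (pvSel candidates).map Prod.fst := by
    rw [sorted2_eq_sorted_toLex]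
    exact alt_order_eq hpre
  show [] ++ ((pvSel candidates).map Prod.fst).take p.toNat
      = if 0 < p then
          PySem.List.slice (PySem.List.sorted2 ((PySem.Dict.mk candidates).keys)
            (fun k => -(PySem.Dict.getD (PySem.Dict.mk candidates) k 0)) (fun k => k)) none (some p)
        else []
  rw [horder]
  by_cases hp : 0 < p
  · rw [if_pos hp, PySem.List.slice_to _ (le_of_lt hp)]
    simp
  · rw [if_neg hp]
    have hz : p.toNat = 0 := by omega
    simp [hz]
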